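-- pv_equiv track=rewrite | github.com/calimero-network/ai-code-reviewer | src/ai_reviewer/review.py | _detect_pr_type
-- ===== SOURCE A (Python) =====
-- def _detect_pr_type(changed_paths: list[str]) -> str:
--     """Detect PR type from changed file paths for context-aware review instructions."""
--     if not changed_paths:
--         return "code"
--     if all(p.endswith(".md") or p.endswith(".mdx") for p in changed_paths):
--         return "docs"
--     if all(
--         p.startswith(".github/") or p.endswith(".yml") or p.endswith(".yaml") for p in changed_paths
--     ):
--         return "ci"
--     return "code"
-- ===== SOURCE B (Python) =====
-- def _classify(p: str) -> frozenset:
--     """Capability set of a single path: which PR types it is compatible with."""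
--     caps = set()
--     if p.endswith(".md") or p.endswith(".mdx"):
--         caps.add("docs")
--     if p.startswith(".github/") or p.endswith(".yml") or p.endswith(".yaml"):
--         caps.add("ci")
--     return frozenset(caps)
--
--
-- def _detect_pr_type(changed_paths: list[str]) -> str:
--     """Detect PR type from changed file paths for context-aware review instructions."""
--     if not changed_paths:
--         return "code"
--     common = frozenset({"docs", "ci"}).intersection(*map(_classify, changed_paths))
--     if "docs" in common:
--         return "docs"
--     if "ci" in common:
--         return "ci"
--     return "code"
-- ===== Notes on version B (the rewrite author's own statement) =====
-- stated objective: alternative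
-- what changed: B maps each path to its capability set (subset of {docs, ci}) via a helper and computes the PR type as the set-intersection meet of these sets, replacing A's two global all(...) predicate scans with a per-element classification plus a lattice-meet reduction.
import Mathlib
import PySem

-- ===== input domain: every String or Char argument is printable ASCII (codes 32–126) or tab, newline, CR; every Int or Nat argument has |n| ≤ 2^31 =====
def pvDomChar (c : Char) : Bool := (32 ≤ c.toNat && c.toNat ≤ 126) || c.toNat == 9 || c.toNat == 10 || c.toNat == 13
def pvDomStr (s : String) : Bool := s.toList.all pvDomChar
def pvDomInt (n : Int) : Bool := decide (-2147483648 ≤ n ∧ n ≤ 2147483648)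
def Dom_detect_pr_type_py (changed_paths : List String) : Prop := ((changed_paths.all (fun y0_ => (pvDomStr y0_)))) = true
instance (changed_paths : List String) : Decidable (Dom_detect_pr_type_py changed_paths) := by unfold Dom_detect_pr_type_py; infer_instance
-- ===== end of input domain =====

-- B classifies each path into its capability set ({docs, ci} subsets) and takes the set-intersection meet over all paths, instead of A's two global all(...) scans (alternative decomposition, same cost).

-- ===== PORT A =====
def detect_pr_type_py (changed_paths : List String) : String :=
  if changed_paths.isEmpty then "code"
  else if changed_paths.all (fun p => PySem.Str.endswith p ".md" || PySem.Str.endswith p ".mdx") then "docs"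
  else if changed_paths.all (fun p => PySem.Str.startswith p ".github/" || PySem.Str.endswith p ".yml" || PySem.Str.endswith p ".yaml") then "ci"
  else "code"

-- ===== PORT B =====
-- per-path capability set (Python _classify)
def pvClassify (p : String) : PySem.Set String :=
  let caps : PySem.Set String := PySem.Set.empty
  let caps := if PySem.Str.endswith p ".md" || PySem.Str.endswith p ".mdx" then PySem.Set.add caps "docs" else caps
  let caps := if PySem.Str.startswith p ".github/" || PySem.Str.endswith p ".yml" || PySem.Str.endswith p ".yaml" then PySem.Set.add caps "ci" else caps
  caps

def detect_pr_type_py_alt (changed_paths : List String) : String :=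
  if changed_paths.isEmpty then "code"
  else
    -- frozenset({"docs","ci"}).intersection(*map(_classify, changed_paths))
    let common := (changed_paths.map pvClassify).foldl PySem.Set.inter (PySem.Set.ofList ["docs", "ci"])
    if PySem.Set.contains common "docs" then "docs"
    else if PySem.Set.contains common "ci" then "ci"
    else "code"

-- ===== PRECONDITION & SPEC =====
def Spec_detect_pr_type_py (changed_paths : List String) (out : String) : Prop := out = detect_pr_type_py_alt changed_paths
instance (changed_paths : List String) (out : String) : Decidable (Spec_detect_pr_type_py changed_paths out) := by unfold Spec_detect_pr_type_py; infer_instance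

-- ===== CLAIM (what is proved, stated in full; the proofs are below) =====
def Claim_equal_detect_pr_type_py : Prop := ∀ (changed_paths : List String), Dom_detect_pr_type_py changed_paths → Spec_detect_pr_type_py changed_paths (detect_pr_type_py changed_paths)

-- ===== LEMMAS AND PROOFS =====

-- membership in a fold of set-intersections = membership in the start set and in every folded set
theorem pv_mem_foldl_inter (ss : List (PySem.Set String)) (init : PySem.Set String) (x : String) :
    x ∈ ss.foldl PySem.Set.inter init ↔ x ∈ init ∧ ∀ s ∈ ss, x ∈ s := by
  induction ss generalizing init with
  | nil => simp
  | cons s ss ih =>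
    simp [List.foldl_cons, ih, PySem.Set.mem_inter]
    tauto

-- "docs" membership in a path's capability set = A's docs predicate
theorem pv_mem_classify_docs (p : String) :
    ("docs" ∈ pvClassify p) ↔ (PySem.Str.endswith p ".md" || PySem.Str.endswith p ".mdx") = true := by
  unfold pvClassify
  split_ifs <;> simp_all [PySem.Set.empty]

-- "ci" membership in a path's capability set = A's ci predicate
theorem pv_mem_classify_ci (p : String) :
    ("ci" ∈ pvClassify p) ↔ (PySem.Str.startswith p ".github/" || PySem.Str.endswith p ".yml" || PySem.Str.endswith p ".yaml") = true := by
  unfold pvClassify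
  split_ifs <;> simp_all [PySem.Set.empty]

-- ===== VERDICT (by name: the statement is the Claim_ definition above) =====
theorem detect_pr_type_py_spec : Claim_equal_detect_pr_type_py := by
  intro changed_paths _
  unfold Spec_detect_pr_type_py detect_pr_type_py detect_pr_type_py_alt
  by_cases hemp : changed_paths.isEmpty
  · simp [hemp]
  · simp only [hemp]
    have hdocs : (PySem.Set.contains
        ((changed_paths.map pvClassify).foldl PySem.Set.inter (PySem.Set.ofList ["docs", "ci"])) "docs")
        = changed_paths.all (fun p => PySem.Str.endswith p ".md" || PySem.Str.endswith p ".mdx") := by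
      rw [Bool.eq_iff_iff, PySem.Set.contains_iff, List.all_eq_true]
      simp [pv_mem_foldl_inter, PySem.Set.mem_ofList, pv_mem_classify_docs]
    have hci : (PySem.Set.contains
        ((changed_paths.map pvClassify).foldl PySem.Set.inter (PySem.Set.ofList ["docs", "ci"])) "ci")
        = changed_paths.all (fun p => PySem.Str.startswith p ".github/" || PySem.Str.endswith p ".yml" || PySem.Str.endswith p ".yaml") := by
      rw [Bool.eq_iff_iff, PySem.Set.contains_iff, List.all_eq_true]
      simp [pv_mem_foldl_inter, PySem.Set.mem_ofList, pv_mem_classify_ci]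
    rw [hdocs, hci]
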